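-- pv_equiv track=rewrite | github.com/ChrisVondi/lead-gen-system | app/scrapers/website.py | _is_generic_email
-- ===== SOURCE A (Python) =====
-- def _is_generic_email(email: str) -> bool:
--     """Check if email is a generic/non-personal address."""
--     if not email:
--         return True
--
--     generic_prefixes = [
--         "info@", "contact@", "hello@", "support@", "help@",
--         "sales@", "marketing@", "admin@", "office@", "team@",
--         "jobs@", "careers@", "hr@", "press@", "media@",
--         "noreply@", "no-reply@", "donotreply@",
--     ]
--
--     email_lower = email.lower()
--     return any(email_lower.startswith(prefix) for prefix in generic_prefixes)
-- ===== SOURCE B (Python) =====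
-- _GENERIC_NAMES = {
--     "info", "contact", "hello", "support", "help",
--     "sales", "marketing", "admin", "office", "team",
--     "jobs", "careers", "hr", "press", "media",
--     "noreply", "no-reply", "donotreply",
-- }
--
--
-- def _is_generic_email(email: str) -> bool:
--     """Check if email is a generic/non-personal address."""
--     if not email:
--         return True
--     local, sep, _ = email.lower().partition("@")
--     return sep == "@" and local in _GENERIC_NAMES
-- ===== Notes on version B (the rewrite author's own statement) =====
-- stated objective: idiomatic
-- what changed: Instead of scanning 18 generic-prefix strings with startswith, B partitions the lowered email at the first at-sign once and tests set membership of the local part, guarding that the separator is present.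
import Mathlib
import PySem

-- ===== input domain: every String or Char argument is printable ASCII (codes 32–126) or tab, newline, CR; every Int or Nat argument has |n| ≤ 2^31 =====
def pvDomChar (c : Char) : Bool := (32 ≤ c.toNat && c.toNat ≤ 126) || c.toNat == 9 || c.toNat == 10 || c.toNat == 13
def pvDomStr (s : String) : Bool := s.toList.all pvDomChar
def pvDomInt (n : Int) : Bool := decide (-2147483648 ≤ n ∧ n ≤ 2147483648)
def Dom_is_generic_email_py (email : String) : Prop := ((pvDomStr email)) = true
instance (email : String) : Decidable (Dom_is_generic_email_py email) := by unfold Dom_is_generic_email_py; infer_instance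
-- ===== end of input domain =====

-- B replaces A's scan over 18 "prefix@" startswith tests by one partition at the first '@'
-- plus membership of the local part in a set of bare names (idiomatic; same cost class).

-- ===== PORT A =====
def pvGenericPrefixes : List String :=
  ["info@", "contact@", "hello@", "support@", "help@",
   "sales@", "marketing@", "admin@", "office@", "team@",
   "jobs@", "careers@", "hr@", "press@", "media@",
   "noreply@", "no-reply@", "donotreply@"]

def is_generic_email_py (email : String) : Bool :=
  if email = "" then true
  else
    let email_lower := PySem.Str.lower email
    pvGenericPrefixes.any (fun p => PySem.Str.startswith email_lower p)

-- ===== PORT B =====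
def pvGenericNames : List (List Char) :=
  ["info".toList, "contact".toList, "hello".toList, "support".toList, "help".toList,
   "sales".toList, "marketing".toList, "admin".toList, "office".toList, "team".toList,
   "jobs".toList, "careers".toList, "hr".toList, "press".toList, "media".toList,
   "noreply".toList, "no-reply".toList, "donotreply".toList]

-- str.partition('@') is ported by hand (PySem has no partition): the part before the
-- first '@' is takeWhile (≠ '@'), and sep == '@' iff dropWhile (≠ '@') is nonempty — exact.
def is_generic_email_py_alt (email : String) : Bool :=
  if email = "" then true
  else
    let cs := (PySem.Str.lower email).toList
    let localPart := cs.takeWhile (fun c => c != '@')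
    let rest := cs.dropWhile (fun c => c != '@')
    !rest.isEmpty && pvGenericNames.contains localPart

-- ===== PRECONDITION & SPEC =====
def Spec_is_generic_email_py (email : String) (out : Bool) : Prop := out = is_generic_email_py_alt email
instance (email : String) (out : Bool) : Decidable (Spec_is_generic_email_py email out) := by unfold Spec_is_generic_email_py; infer_instance

-- ===== CLAIM (what is proved, stated in full; the proofs are below) =====
def Claim_equal_is_generic_email_py : Prop := ∀ (email : String), Dom_is_generic_email_py email → Spec_is_generic_email_py email (is_generic_email_py email)

-- ===== LEMMAS AND PROOFS =====

-- Characterisation of "starts with p followed by '@'" (p free of '@') via the partition at the first '@'.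
theorem pv_part (p cs : List Char) (hp : '@' ∉ p) :
    (p ++ ['@'] <+: cs)
      ↔ (cs.takeWhile (fun c => c != '@') = p ∧ cs.dropWhile (fun c => c != '@') ≠ []) := by
  induction p generalizing cs with
  | nil =>
    cases cs with
    | nil => simp
    | cons c cs' =>
      by_cases h : c = '@'
      · simp [List.cons_prefix_cons, h]
      · simp [List.cons_prefix_cons, h, Ne.symm h]
  | cons q p' ih =>
    have hq : q ≠ '@' := fun h => hp (by simp [h])
    have hp' : '@' ∉ p' := fun h => hp (List.mem_cons_of_mem _ h)
    cases cs with
    | nil => simp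
    | cons c cs' =>
      by_cases h : c = '@'
      · subst h
        simp [List.cons_prefix_cons, hq]
      · simp only [List.cons_append, List.cons_prefix_cons,
          List.takeWhile_cons, List.dropWhile_cons, bne_iff_ne, ne_eq, h, not_false_eq_true, if_pos,
          ih cs' hp', List.cons.injEq]
        constructor
        · rintro ⟨rfl, h2, h3⟩; exact ⟨⟨rfl, h2⟩, h3⟩
        · rintro ⟨⟨rfl, h2⟩, h3⟩; exact ⟨rfl, h2, h3⟩

-- The same fact on the Bool level, in the shape both ports compute.
theorem pv_prefixAt (p cs : List Char) (hp : '@' ∉ p) :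
    PySem.Chars.startswith cs (p ++ ['@'])
      = ((cs.takeWhile (fun c => c != '@') == p) && !(cs.dropWhile (fun c => c != '@')).isEmpty) := by
  rw [Bool.eq_iff_iff, PySem.Chars.startswith_iff, pv_part p cs hp]
  simp

set_option maxHeartbeats 1000000 in
theorem pv_main (cs : List Char) :
    (pvGenericPrefixes.any (fun p => PySem.Chars.startswith cs p.toList))
      = (!(cs.dropWhile (fun c => c != '@')).isEmpty
          && pvGenericNames.contains (cs.takeWhile (fun c => c != '@'))) := by
  have h : ∀ p : List Char, '@' ∉ p →
      PySem.Chars.startswith cs (p ++ ['@'])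
        = ((cs.takeWhile (fun c => c != '@') == p) && !(cs.dropWhile (fun c => c != '@')).isEmpty) :=
    fun p hp => pv_prefixAt p cs hp
  simp only [pvGenericPrefixes, pvGenericNames, List.any_cons, List.any_nil]
  rw [show ("info@" : String).toList = "info".toList ++ ['@'] from rfl,
      show ("contact@" : String).toList = "contact".toList ++ ['@'] from rfl,
      show ("hello@" : String).toList = "hello".toList ++ ['@'] from rfl,
      show ("support@" : String).toList = "support".toList ++ ['@'] from rfl,
      show ("help@" : String).toList = "help".toList ++ ['@'] from rfl,
      show ("sales@" : String).toList = "sales".toList ++ ['@'] from rfl,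
      show ("marketing@" : String).toList = "marketing".toList ++ ['@'] from rfl,
      show ("admin@" : String).toList = "admin".toList ++ ['@'] from rfl,
      show ("office@" : String).toList = "office".toList ++ ['@'] from rfl,
      show ("team@" : String).toList = "team".toList ++ ['@'] from rfl,
      show ("jobs@" : String).toList = "jobs".toList ++ ['@'] from rfl,
      show ("careers@" : String).toList = "careers".toList ++ ['@'] from rfl,
      show ("hr@" : String).toList = "hr".toList ++ ['@'] from rfl,
      show ("press@" : String).toList = "press".toList ++ ['@'] from rfl,
      show ("media@" : String).toList = "media".toList ++ ['@'] from rfl,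
      show ("noreply@" : String).toList = "noreply".toList ++ ['@'] from rfl,
      show ("no-reply@" : String).toList = "no-reply".toList ++ ['@'] from rfl,
      show ("donotreply@" : String).toList = "donotreply".toList ++ ['@'] from rfl,
      h _ (by decide), h _ (by decide), h _ (by decide), h _ (by decide), h _ (by decide),
      h _ (by decide), h _ (by decide), h _ (by decide), h _ (by decide), h _ (by decide),
      h _ (by decide), h _ (by decide), h _ (by decide), h _ (by decide), h _ (by decide),
      h _ (by decide), h _ (by decide), h _ (by decide)]
  cases hr : ((cs.dropWhile (fun c => c != '@')).isEmpty) <;>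
    simp [Bool.beq_eq_decide_eq]

-- ===== VERDICT (by name: the statement is the Claim_ definition above) =====
theorem is_generic_email_py_spec : Claim_equal_is_generic_email_py := by
  intro email _
  unfold Spec_is_generic_email_py is_generic_email_py is_generic_email_py_alt
  by_cases h : email = ""
  · simp [h]
  · simp only [h, if_false]
    simpa using pv_main (PySem.Str.lower email).toList
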